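-- pv_equiv track=rewrite | github.com/roudjy/trading-agent | research/viability_metrics.py | _aggregate_from_ledger
-- ===== SOURCE A (Python) =====
-- from typing import Any, Final
--
-- def _aggregate_from_ledger(evidence_ledger: dict[str, Any]) -> dict[str, int]:
--     rows = evidence_ledger.get("hypothesis_evidence") or []
--     totals = {
--         "campaign_count": 0,
--         "candidate_count": 0,
--         "near_candidate_count": 0,
--         "paper_ready_count": 0,
--         "exploratory_pass_count": 0,  # nosec B105 — counter key, not a credential
--         "rejection_count": 0,
--         "technical_failure_count": 0,
--     }
--     for row in rows:
--         totals["campaign_count"] += int(row.get("campaign_count") or 0)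
--         totals["candidate_count"] += int(row.get("promotion_candidate_count") or 0)
--         totals["paper_ready_count"] += int(row.get("paper_ready_count") or 0)
--         totals["exploratory_pass_count"] += int(row.get("exploratory_pass_count") or 0)
--         totals["rejection_count"] += int(row.get("rejection_count") or 0)
--         totals["technical_failure_count"] += int(row.get("technical_failure_count") or 0)
--     return totals
-- ===== SOURCE B (Python) =====
-- def _aggregate_from_ledger(evidence_ledger):
--     rows = evidence_ledger.get("hypothesis_evidence") or []
--     fields = [
--         ("campaign_count", "campaign_count"),
--         ("candidate_count", "promotion_candidate_count"),
--         ("near_candidate_count", None),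
--         ("paper_ready_count", "paper_ready_count"),
--         ("exploratory_pass_count", "exploratory_pass_count"),
--         ("rejection_count", "rejection_count"),
--         ("technical_failure_count", "technical_failure_count"),
--     ]
--     return {
--         out: 0 if src is None else sum(int(r.get(src) or 0) for r in rows)
--         for out, src in fields
--     }
-- ===== Notes on version B (the rewrite author's own statement) =====
-- stated objective: idiomatic
-- what changed: Replaces the row-wise loop mutating a totals dict with a declarative field table (output key -> source row key) and a column-wise per-field sum over the rows, building the result dict in one comprehension.
import Mathlib
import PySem

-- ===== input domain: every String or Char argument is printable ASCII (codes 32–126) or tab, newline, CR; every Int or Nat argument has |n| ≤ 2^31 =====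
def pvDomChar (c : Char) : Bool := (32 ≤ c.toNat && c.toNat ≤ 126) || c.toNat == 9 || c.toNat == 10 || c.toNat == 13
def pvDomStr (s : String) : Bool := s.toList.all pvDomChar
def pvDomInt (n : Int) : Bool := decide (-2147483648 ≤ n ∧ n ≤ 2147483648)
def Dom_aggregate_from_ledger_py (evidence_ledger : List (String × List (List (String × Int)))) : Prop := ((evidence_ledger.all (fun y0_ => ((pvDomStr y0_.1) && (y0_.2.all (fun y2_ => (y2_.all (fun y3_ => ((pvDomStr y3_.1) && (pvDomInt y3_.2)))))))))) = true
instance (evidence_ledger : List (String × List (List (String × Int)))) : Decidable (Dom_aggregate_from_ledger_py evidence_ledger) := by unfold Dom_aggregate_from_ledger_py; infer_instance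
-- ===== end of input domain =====

-- B replaces A's row-wise loop mutating a totals dict with a declarative field table
-- and a column-wise per-field sum over the rows (idiomatic; same cost).

-- ===== PORT A =====
-- int(row.get(k) or 0)  (assoc-list dict: lookup = first match; 'or 0' maps None to 0 and 0 to 0, so getD 0 is exact)
def pvRowGet (row : List (String × Int)) (k : String) : Int := (row.lookup k).getD 0

-- the body of A's 'for row in rows' loop: six in-place '+=' updates of the totals dict
def pvStep (t : PySem.Dict String Int) (row : List (String × Int)) : PySem.Dict String Int :=
  let t := t.modify "campaign_count" 0 (· + pvRowGet row "campaign_count")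
  let t := t.modify "candidate_count" 0 (· + pvRowGet row "promotion_candidate_count")
  let t := t.modify "paper_ready_count" 0 (· + pvRowGet row "paper_ready_count")
  let t := t.modify "exploratory_pass_count" 0 (· + pvRowGet row "exploratory_pass_count")
  let t := t.modify "rejection_count" 0 (· + pvRowGet row "rejection_count")
  let t := t.modify "technical_failure_count" 0 (· + pvRowGet row "technical_failure_count")
  t

def aggregate_from_ledger_py (evidence_ledger : List (String × List (List (String × Int)))) : List (String × Int) :=
  -- rows = evidence_ledger.get("hypothesis_evidence") or []  ('or []' maps None and [] alike to [])
  let rows := (evidence_ledger.lookup "hypothesis_evidence").getD []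
  let totals : PySem.Dict String Int := PySem.Dict.mk
    [("campaign_count", 0), ("candidate_count", 0), ("near_candidate_count", 0),
     ("paper_ready_count", 0), ("exploratory_pass_count", 0), ("rejection_count", 0),
     ("technical_failure_count", 0)]
  let totals := rows.foldl pvStep totals
  totals.items

-- ===== PORT B =====
-- the field table of Source B: output key ↦ source row key (none = the always-zero field)
def pvFields : List (String × Option String) :=
  [("campaign_count", some "campaign_count"),
   ("candidate_count", some "promotion_candidate_count"),
   ("near_candidate_count", none),
   ("paper_ready_count", some "paper_ready_count"),
   ("exploratory_pass_count", some "exploratory_pass_count"),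
   ("rejection_count", some "rejection_count"),
   ("technical_failure_count", some "technical_failure_count")]

-- sum(int(r.get(src) or 0) for r in rows)
def pvColSum (rows : List (List (String × Int))) (src : String) : Int :=
  (rows.map (fun r => (r.lookup src).getD 0)).sum

def aggregate_from_ledger_py_alt (evidence_ledger : List (String × List (List (String × Int)))) : List (String × Int) :=
  let rows := (evidence_ledger.lookup "hypothesis_evidence").getD []
  pvFields.map (fun p => (p.1, match p.2 with
    | none => 0
    | some src => pvColSum rows src))

-- ===== PRECONDITION & SPEC =====
def Spec_aggregate_from_ledger_py (evidence_ledger : List (String × List (List (String × Int)))) (out : List (String × Int)) : Prop := out = aggregate_from_ledger_py_alt evidence_ledger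
instance (evidence_ledger : List (String × List (List (String × Int)))) (out : List (String × Int)) : Decidable (Spec_aggregate_from_ledger_py evidence_ledger out) := by unfold Spec_aggregate_from_ledger_py; infer_instance

-- ===== CLAIM (what is proved, stated in full; the proofs are below) =====
def Claim_equal_aggregate_from_ledger_py : Prop := ∀ (evidence_ledger : List (String × List (List (String × Int)))), Dom_aggregate_from_ledger_py evidence_ledger → Spec_aggregate_from_ledger_py evidence_ledger (aggregate_from_ledger_py evidence_ledger)

-- ===== LEMMAS AND PROOFS =====

-- one loop iteration on the (always 7-key) totals dict, with symbolic current values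
theorem pv_step_lit (a b c d e f : Int) (row : List (String × Int)) :
    pvStep (PySem.Dict.mk
      [("campaign_count", a), ("candidate_count", b), ("near_candidate_count", 0),
       ("paper_ready_count", c), ("exploratory_pass_count", d), ("rejection_count", e),
       ("technical_failure_count", f)]) row = PySem.Dict.mk
      [("campaign_count", a + pvRowGet row "campaign_count"),
       ("candidate_count", b + pvRowGet row "promotion_candidate_count"),
       ("near_candidate_count", 0),
       ("paper_ready_count", c + pvRowGet row "paper_ready_count"),
       ("exploratory_pass_count", d + pvRowGet row "exploratory_pass_count"),
       ("rejection_count", e + pvRowGet row "rejection_count"),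
       ("technical_failure_count", f + pvRowGet row "technical_failure_count")] := by
  simp [pvStep, PySem.Dict.modify, PySem.Dict.ext_iff, PySem.Dict.items_insert,
    PySem.Dict.get?_insert, PySem.Dict.contains_insert, PySem.Dict.getD_eq_get?_getD,
    PySem.Dict.get?_mk_cons]

-- A's whole loop adds the column sums to the six live fields
theorem pv_fold_eq (rows : List (List (String × Int))) (a b c d e f : Int) :
    rows.foldl pvStep (PySem.Dict.mk
      [("campaign_count", a), ("candidate_count", b), ("near_candidate_count", 0),
       ("paper_ready_count", c), ("exploratory_pass_count", d), ("rejection_count", e),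
       ("technical_failure_count", f)]) = PySem.Dict.mk
      [("campaign_count", a + pvColSum rows "campaign_count"),
       ("candidate_count", b + pvColSum rows "promotion_candidate_count"),
       ("near_candidate_count", 0),
       ("paper_ready_count", c + pvColSum rows "paper_ready_count"),
       ("exploratory_pass_count", d + pvColSum rows "exploratory_pass_count"),
       ("rejection_count", e + pvColSum rows "rejection_count"),
       ("technical_failure_count", f + pvColSum rows "technical_failure_count")] := by
  induction rows generalizing a b c d e f with
  | nil => simp [pvColSum]
  | cons r rs ih =>
      rw [List.foldl_cons, pv_step_lit, ih]
      simp only [PySem.Dict.mk.injEq, List.cons.injEq, Prod.mk.injEq, and_true, true_and]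
      simp [pvColSum, pvRowGet]
      omega

theorem aggregate_from_ledger_py_spec : Claim_equal_aggregate_from_ledger_py := by
  intro el _
  show aggregate_from_ledger_py el = aggregate_from_ledger_py_alt el
  simp only [aggregate_from_ledger_py, aggregate_from_ledger_py_alt]
  rw [pv_fold_eq]
  simp [pvFields]
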